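-- pv_equiv track=rewrite | github.com/Patxi91/CodeWars_Cloud | 6kyu-Find Cracker-Patxi.py | find_hack
-- ===== SOURCE A (Python) =====
-- def find_hack(arr):
--     hacked_entries = []
--     for record in arr:
--         total_points = 0
--         for grade in record[2]:
--             if grade == "A":
--                 total_points += 30
--             elif grade == "B":
--                 total_points += 20
--             elif grade == "C":
--                 total_points += 10
--             elif grade == "D":
--                 total_points += 5
--         if len(record[2]) >= 5 and all(grade in ["A", "B"] for grade in record[2]):
--             total_points += 20
--         total_points = min(total_points, 200)
--         if total_points != record[1]:
--             hacked_entries.append(record[0])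
--     return hacked_entries
-- ===== SOURCE B (Python) =====
-- def _total(grades):
--     a = grades.count("A")
--     b = grades.count("B")
--     t = 30 * a + 20 * b + 10 * grades.count("C") + 5 * grades.count("D")
--     if len(grades) >= 5 and a + b == len(grades):
--         t += 20
--     return min(t, 200)
--
--
-- def find_hack(arr):
--     return [record[0] for record in arr if _total(record[2]) != record[1]]
-- ===== Notes on version B (the rewrite author's own statement) =====
-- stated objective: idiomatic
-- what changed: Replaces the per-character if/elif accumulation and the all(...) scan with per-grade counts (list.count) combined by a closed arithmetic formula, the bonus expressed as count('A')+count('B')==len, and a list comprehension instead of the append loop.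
import Mathlib
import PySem

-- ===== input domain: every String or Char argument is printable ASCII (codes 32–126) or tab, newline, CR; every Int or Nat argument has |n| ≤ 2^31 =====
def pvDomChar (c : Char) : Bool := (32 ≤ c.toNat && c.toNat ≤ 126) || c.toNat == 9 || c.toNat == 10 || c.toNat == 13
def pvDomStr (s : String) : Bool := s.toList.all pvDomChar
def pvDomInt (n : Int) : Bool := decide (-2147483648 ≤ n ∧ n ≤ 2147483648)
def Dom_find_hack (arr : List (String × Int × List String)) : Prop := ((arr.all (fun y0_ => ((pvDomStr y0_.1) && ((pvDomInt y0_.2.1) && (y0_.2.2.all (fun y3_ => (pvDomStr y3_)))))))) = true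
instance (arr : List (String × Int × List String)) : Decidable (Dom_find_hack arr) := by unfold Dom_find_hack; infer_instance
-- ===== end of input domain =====

-- B replaces A's per-grade if/elif accumulation with list.count tallies combined by a
-- closed formula and a list comprehension (idiomatic; same cost).

-- ===== PORT A =====
def find_hack (arr : List (String × Int × List String)) : List String :=
  arr.foldl (fun hacked_entries record =>
    let total_points : Int :=
      record.2.2.foldl (fun t grade =>
        if grade = "A" then t + 30
        else if grade = "B" then t + 20
        else if grade = "C" then t + 10
        else if grade = "D" then t + 5
        else t) 0
    let total_points :=
      if 5 ≤ record.2.2.length ∧ record.2.2.all (fun grade => grade == "A" || grade == "B")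
      then total_points + 20 else total_points
    let total_points := min total_points 200
    if total_points ≠ record.2.1 then hacked_entries ++ [record.1] else hacked_entries) []

-- ===== PORT B =====
def fh_total (grades : List String) : Int :=
  let a : Int := PySem.List.count grades "A"
  let b : Int := PySem.List.count grades "B"
  let t : Int := 30 * a + 20 * b + 10 * (PySem.List.count grades "C" : Int)
                 + 5 * (PySem.List.count grades "D" : Int)
  let t := if 5 ≤ grades.length ∧ a + b = (grades.length : Int) then t + 20 else t
  min t 200

def find_hack_alt (arr : List (String × Int × List String)) : List String :=
  (arr.filter (fun record => fh_total record.2.2 ≠ record.2.1)).map (fun record => record.1)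

-- ===== PRECONDITION & SPEC =====
def Spec_find_hack (arr : List (String × Int × List String)) (out : List String) : Prop := out = find_hack_alt arr
instance (arr : List (String × Int × List String)) (out : List String) : Decidable (Spec_find_hack arr out) := by unfold Spec_find_hack; infer_instance

-- ===== CLAIM (what is proved, stated in full; the proofs are below) =====
def Claim_equal_find_hack : Prop := ∀ (arr : List (String × Int × List String)), Dom_find_hack arr → Spec_find_hack arr (find_hack arr)

-- ===== LEMMAS AND PROOFS =====

-- A's inner accumulation equals the count formula.
theorem fh_points_eq (gs : List String) (t : Int) :
    gs.foldl (fun t grade =>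
        if grade = "A" then t + 30
        else if grade = "B" then t + 20
        else if grade = "C" then t + 10
        else if grade = "D" then t + 5
        else t) t
    = t + 30 * (PySem.List.count gs "A" : Int) + 20 * (PySem.List.count gs "B" : Int)
        + 10 * (PySem.List.count gs "C" : Int) + 5 * (PySem.List.count gs "D" : Int) := by
  induction gs generalizing t with
  | nil => simp [PySem.List.count]
  | cons g gs ih =>
    simp only [List.foldl_cons, ih, PySem.List.count, List.count_cons]
    by_cases hA : g = "A" <;> by_cases hB : g = "B" <;> by_cases hC : g = "C" <;>
      by_cases hD : g = "D" <;>
      simp_all [PySem.List.count] <;> push_cast <;> ring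

-- A's all-A-or-B test equals B's count equation.
theorem fh_count_AB_le (gs : List String) :
    List.count "A" gs + List.count "B" gs ≤ gs.length := by
  induction gs with
  | nil => simp
  | cons g gs ih =>
    by_cases hA : g = "A" <;> by_cases hB : g = "B" <;>
      simp_all [List.count_cons] <;> omega

theorem fh_all_eq (gs : List String) :
    (gs.all (fun grade => grade == "A" || grade == "B"))
    = decide ((PySem.List.count gs "A" : Int) + (PySem.List.count gs "B" : Int) = (gs.length : Int)) := by
  induction gs with
  | nil => simp [PySem.List.count]
  | cons g gs ih =>
    have hle := fh_count_AB_le gs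
    simp only [List.all_cons, PySem.List.count, List.count_cons] at *
    by_cases hA : g = "A" <;> by_cases hB : g = "B"
    · exact absurd (hA.symm.trans hB) (by decide)
    · subst hA; simp [ih, decide_eq_decide]; omega
    · subst hB; simp [ih, decide_eq_decide]; omega
    · have h1 : (g == "A") = false := by simp [hA]
      have h2 : (g == "B") = false := by simp [hB]
      simp only [h1, h2, beq_iff_eq, hA, hB, if_false, Bool.false_or, Bool.false_and]
      symm
      simp only [decide_eq_false_iff_not, List.length_cons]
      push_cast
      omega

theorem fh_record_eq (r : String × Int × List String) :
    (let total_points : Int :=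
      r.2.2.foldl (fun t grade =>
        if grade = "A" then t + 30
        else if grade = "B" then t + 20
        else if grade = "C" then t + 10
        else if grade = "D" then t + 5
        else t) 0
     let total_points :=
      if 5 ≤ r.2.2.length ∧ r.2.2.all (fun grade => grade == "A" || grade == "B")
      then total_points + 20 else total_points
     min total_points 200) = fh_total r.2.2 := by
  simp only [fh_points_eq, fh_total, fh_all_eq]
  by_cases h5 : 5 ≤ r.2.2.length <;>
    by_cases hab : (PySem.List.count r.2.2 "A" : Int) + (PySem.List.count r.2.2 "B" : Int) = (r.2.2.length : Int) <;>
    simp [h5, hab]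

theorem fh_fold_eq (arr : List (String × Int × List String)) (acc : List String) :
    arr.foldl (fun hacked_entries record =>
      let total_points : Int :=
        record.2.2.foldl (fun t grade =>
          if grade = "A" then t + 30
          else if grade = "B" then t + 20
          else if grade = "C" then t + 10
          else if grade = "D" then t + 5
          else t) 0
      let total_points :=
        if 5 ≤ record.2.2.length ∧ record.2.2.all (fun grade => grade == "A" || grade == "B")
        then total_points + 20 else total_points
      let total_points := min total_points 200
      if total_points ≠ record.2.1 then hacked_entries ++ [record.1] else hacked_entries) acc
    = acc ++ find_hack_alt arr := by
  induction arr generalizing acc with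
  | nil => simp [find_hack_alt]
  | cons r arr ih =>
    simp only [List.foldl_cons, ih, find_hack_alt, List.filter_cons]
    have := fh_record_eq r
    simp only at this
    rw [this]
    by_cases h : fh_total r.2.2 ≠ r.2.1 <;> simp [h]

-- ===== VERDICT (by name: the statement is the Claim_ definition above) =====
theorem find_hack_spec : Claim_equal_find_hack := by
  intro arr _
  show find_hack arr = find_hack_alt arr
  have h := fh_fold_eq arr []
  simp only [List.nil_append] at h
  exact h
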